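-- pv_equiv track=rewrite | github.com/yokeTH/eng-com-prog-cu | grader/part-III/Part-III-★★★-Ascii-Text.py | lstrip
-- ===== SOURCE A (Python) =====
-- def lstrip(lns:list):
--     lMargin = len(lns[0])
--     for ln in lns:
--         for i in range(len(ln)):
--             if ln[i] != '.' and i < lMargin:
--                 lMargin = i
--                 break
--     return [ln[lMargin:] for ln in lns]
-- ===== SOURCE B (Python) =====
-- def lstrip(lns: list):
--     # Column-major scan: find the first column (< width of the first line)
--     # where some line has a non-'.' character; that column is the margin.
--     width = len(lns[0])
--     margin = width
--     for c in range(width):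
--         if any(len(ln) > c and ln[c] != '.' for ln in lns):
--             margin = c
--             break
--     return [ln[margin:] for ln in lns]
-- ===== Notes on version B (the rewrite author's own statement) =====
-- stated objective: faster
-- what changed: Replaces A's row-major scan (per line, find its first non-dot index and keep a running minimum) by a column-major sweep that breaks at the first column where any line has a non-dot character, so only margin+1 columns are ever inspected.
-- outside the precondition, e.g. on lstrip([]): A raises IndexError, B raises IndexError
import Mathlib
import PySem

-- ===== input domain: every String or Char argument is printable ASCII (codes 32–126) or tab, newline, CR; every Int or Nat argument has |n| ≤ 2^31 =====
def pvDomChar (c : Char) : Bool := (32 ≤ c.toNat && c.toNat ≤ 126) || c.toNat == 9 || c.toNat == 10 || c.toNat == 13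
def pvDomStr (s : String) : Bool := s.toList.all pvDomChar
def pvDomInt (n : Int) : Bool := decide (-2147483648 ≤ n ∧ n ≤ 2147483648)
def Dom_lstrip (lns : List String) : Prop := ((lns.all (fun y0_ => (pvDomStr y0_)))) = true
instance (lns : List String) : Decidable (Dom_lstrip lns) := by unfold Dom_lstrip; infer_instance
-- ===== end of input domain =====

-- B replaces A's row-major minimum-of-first-non-dot-index scan by a column-major
-- sweep with an early break (alternative decomposition, same return value).

-- ===== PORT A =====
-- inner 'for i in range(len(ln))' loop of A, carrying the index i and lMargin m
def lstripInner : List Char → Nat → Nat → Nat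
  | [], _, m => m
  | c :: rest, i, m => if c != '.' && decide (i < m) then i else lstripInner rest (i + 1) m

-- lns[0] raises IndexError on []; Pre_lstrip excludes that input, headD only for totality
def lstrip (lns : List String) : List String :=
  let lMargin := lns.foldl (fun m ln => lstripInner ln.toList 0 m) (lns.headD "").toList.length
  lns.map (fun ln => PySem.Str.slice ln (some (lMargin : Int)) none)

-- ===== PORT B =====
-- 'for c in range(width)' with break: first column with a non-dot char in some line
def lstripColScan (lns : List String) (width : Nat) (c : Nat) : Nat :=
  if c < width then
    if lns.any (fun ln => decide (c < ln.toList.length) && (ln.toList.getD c '.' != '.')) then c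
    else lstripColScan lns width (c + 1)
  else width
termination_by width - c

def lstrip_alt (lns : List String) : List String :=
  let width := (lns.headD "").toList.length
  let margin := lstripColScan lns width 0
  lns.map (fun ln => PySem.Str.slice ln (some (margin : Int)) none)

-- ===== PRECONDITION & SPEC =====
-- Python A evaluates lns[0] and raises IndexError on the empty list; so does B.
def Pre_lstrip (lns : List String) : Prop := lns ≠ []
instance (lns : List String) : Decidable (Pre_lstrip lns) := by unfold Pre_lstrip; infer_instance
def pvWitness_lstrip : List String := ["..ab", ".cd", "...."]

def Spec_lstrip (lns : List String) (out : List String) : Prop := out = lstrip_alt lns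
instance (lns : List String) (out : List String) : Decidable (Spec_lstrip lns out) := by unfold Spec_lstrip; infer_instance

-- ===== CLAIM (what is proved, stated in full; the proofs are below) =====
def Claim_equal_lstrip : Prop := ∀ (lns : List String), Dom_lstrip lns → Pre_lstrip lns → Spec_lstrip lns (lstrip lns)

-- ===== LEMMAS AND PROOFS =====

-- first non-dot index of a line ('.length' if the line is all dots)
def pvFnd (l : List Char) : Nat := l.findIdx (fun c => c != '.')

lemma lstripInner_ge (l : List Char) : ∀ i m, m ≤ i → lstripInner l i m = m := by
  induction l with
  | nil => intro i m _; rfl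
  | cons c rest ih =>
      intro i m h
      simp only [lstripInner]
      have : ¬ (i < m) := by omega
      simp [this, ih (i + 1) m (by omega)]

lemma lstripInner_eq (l : List Char) : ∀ i m,
    lstripInner l i m = if pvFnd l < l.length ∧ i + pvFnd l < m then i + pvFnd l else m := by
  induction l with
  | nil => intro i m; simp [lstripInner, pvFnd]
  | cons c rest ih =>
      intro i m
      by_cases hc : c = '.'
      · subst hc
        have hfnd : pvFnd ('.' :: rest) = pvFnd rest + 1 := by
          simp [pvFnd, List.findIdx_cons]
        have hstep : lstripInner ('.' :: rest) i m = lstripInner rest (i + 1) m := by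
          simp [lstripInner]
        rw [hstep, ih, hfnd]
        simp only [List.length_cons]
        by_cases h : pvFnd rest < rest.length ∧ i + 1 + pvFnd rest < m
        · rw [if_pos h, if_pos (by omega)]; omega
        · rw [if_neg h, if_neg (by omega)]
      · have hb : (c != '.') = true := by simp [hc]
        by_cases him : i < m
        · simp [lstripInner, pvFnd, List.findIdx_cons, hb, him]
        · simp only [lstripInner, pvFnd, List.findIdx_cons, hb, cond_true]
          have hnm : ¬ (i < m) := him
          simp only [hnm, decide_false, Bool.and_false, Bool.false_eq_true, if_false]
          rw [lstripInner_ge rest (i + 1) m (by omega)]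
          simp only [List.length_cons]
          rw [if_neg (by omega)]

-- A's fold step, after lstripInner_eq with i = 0
def pvStep (m : Nat) (ln : String) : Nat :=
  if pvFnd ln.toList < ln.toList.length ∧ pvFnd ln.toList < m then pvFnd ln.toList else m

lemma foldA_eq (lns : List String) : ∀ (w : Nat),
    lns.foldl (fun m ln => lstripInner ln.toList 0 m) w = lns.foldl pvStep w := by
  induction lns with
  | nil => intro w; rfl
  | cons ln rest ih =>
      intro w
      rw [List.foldl_cons, List.foldl_cons, ih]
      congr 1
      rw [lstripInner_eq]
      simp [pvStep]

lemma foldA_facts (lns : List String) : ∀ (m : Nat),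
    lns.foldl pvStep m ≤ m ∧
    (∀ ln ∈ lns, pvFnd ln.toList < ln.toList.length → lns.foldl pvStep m ≤ pvFnd ln.toList) ∧
    (lns.foldl pvStep m = m ∨
      ∃ ln ∈ lns, pvFnd ln.toList < ln.toList.length ∧ pvFnd ln.toList = lns.foldl pvStep m) := by
  induction lns with
  | nil => intro m; simp
  | cons ln₀ rest ih =>
      intro m
      obtain ⟨h1, h2, h3⟩ := ih (pvStep m ln₀)
      simp only [List.foldl_cons]
      have hstep_le : pvStep m ln₀ ≤ m := by unfold pvStep; split <;> omega
      refine ⟨le_trans h1 hstep_le, ?_, ?_⟩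
      · intro ln hln hnd
        rcases List.mem_cons.mp hln with h | h
        · subst h
          have : pvStep m ln ≤ pvFnd ln.toList := by unfold pvStep; split <;> omega
          exact le_trans h1 this
        · exact h2 ln h hnd
      · rcases h3 with h3 | ⟨ln, hln, hnd, hfe⟩
        · by_cases hm : pvStep m ln₀ = m
          · left; rw [h3, hm]
          · right
            have hcond : pvFnd ln₀.toList < ln₀.toList.length ∧ pvFnd ln₀.toList < m := by
              by_contra hcc
              exact hm (by unfold pvStep; rw [if_neg hcc])
            have hval : pvStep m ln₀ = pvFnd ln₀.toList := by
              unfold pvStep; rw [if_pos hcond]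
            exact ⟨ln₀, by simp, hcond.1, by rw [h3, hval]⟩
        · exact Or.inr ⟨ln, List.mem_cons_of_mem _ hln, hnd, hfe⟩

-- the column predicate of B
def pvP (lns : List String) (c : Nat) : Prop :=
  ∃ ln ∈ lns, c < ln.toList.length ∧ ln.toList.getD c '.' ≠ '.'

lemma pvP_iff_any (lns : List String) (c : Nat) :
    (lns.any (fun ln => decide (c < ln.toList.length) && (ln.toList.getD c '.' != '.'))) = true
      ↔ pvP lns c := by
  simp [pvP, List.any_eq_true]

lemma fnd_spec_ne (l : List Char) (h : pvFnd l < l.length) : l.getD (pvFnd l) '.' ≠ '.' := by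
  have := List.findIdx_getElem (p := fun c => c != '.') (w := h)
  simp only [bne_iff_ne] at this
  rwa [List.getD_eq_getElem l '.' h]

lemma fnd_le_of_ne (l : List Char) (c : Nat) (hc : c < l.length) (hne : l.getD c '.' ≠ '.') :
    pvFnd l ≤ c := by
  by_contra h
  replace h := Nat.lt_of_not_le h
  have := List.not_of_lt_findIdx (p := fun c => c != '.') h
  rw [List.getD_eq_getElem l '.' hc] at hne
  simp at this
  exact hne this

lemma colScan_run (lns : List String) (W mA : Nat)
    (hub : ∀ ln ∈ lns, pvFnd ln.toList < ln.toList.length → mA ≤ pvFnd ln.toList)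
    (hach : mA = W ∨ ∃ ln ∈ lns, pvFnd ln.toList < ln.toList.length ∧ pvFnd ln.toList = mA) :
    ∀ c, c ≤ mA → mA ≤ W → lstripColScan lns W c = mA := by
  intro c hc hW
  rw [lstripColScan]
  by_cases hcW : c < W
  · rw [if_pos hcW]
    by_cases hP : pvP lns c
    · -- column c has a non-dot char in some line, so mA ≤ c ≤ mA
      obtain ⟨ln, hln, hlen, hne⟩ := hP
      have h1 : pvFnd ln.toList ≤ c := fnd_le_of_ne _ _ hlen hne
      have h2 : mA ≤ pvFnd ln.toList := hub ln hln (by omega)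
      rw [if_pos ((pvP_iff_any lns c).mpr ⟨ln, hln, hlen, hne⟩)]
      omega
    · -- no non-dot char in column c: then c < mA (else mA is achieved at column c)
      rw [if_neg (by rw [pvP_iff_any]; exact hP)]
      have hlt : c < mA := by
        rcases Nat.lt_or_ge c mA with h | h
        · exact h
        · exfalso
          have hceq : c = mA := by omega
          rcases hach with h3 | ⟨ln, hln, hnd, hfe⟩
          · omega
          · exact hP ⟨ln, hln, by omega, by rw [hceq, ← hfe]; exact fnd_spec_ne _ hnd⟩
      exact colScan_run lns W mA hub hach (c + 1) (by omega) hW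
  · rw [if_neg hcW]
    omega
termination_by c => W - c

lemma margins_eq (lns : List String) :
    lstripColScan lns (lns.headD "").toList.length 0
      = lns.foldl (fun m ln => lstripInner ln.toList 0 m) (lns.headD "").toList.length := by
  rw [foldA_eq]
  obtain ⟨h1, h2, h3⟩ := foldA_facts lns (lns.headD "").toList.length
  exact colScan_run lns _ _ h2 (by tauto) 0 (Nat.zero_le _) h1

-- ===== VERDICT (by name: the statement is the Claim_ definition above) =====
theorem lstrip_spec : Claim_equal_lstrip := by
  intro lns _ _
  unfold Spec_lstrip lstrip lstrip_alt
  exact congrArg (fun k : Nat => lns.map (fun ln => PySem.Str.slice ln (some (k : Int)) none))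
    (margins_eq lns).symm
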